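-- pv_equiv track=rewrite | github.com/seniortasse/SudokuCompanionToolkit-v3 | python/step-by-step_solutions/generator_old2/techniques/options.py | _group_values
-- ===== SOURCE A (Python) =====
-- import itertools
-- from operator import itemgetter
--
-- def _group_values(values):
--     # Similar as for the logic of finding singles based on values (here on options), we want to know how the new value
--     #  was found (only here we only distinguish between only occurrence in cell or dim), this will be used in the logs
--
--     grouped_values = []
--     # IMPORTANT: groupby() only groups similar items when they are consecutive, if they are scattered through the list
--     #  they will each be in a separate group (this doesn't make a lot of sense..), therefore we have to sort the list
--     #  first based on the key
--     sort_key = itemgetter(0)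
--     values = sorted(values, key=sort_key)
--     grouper = itertools.groupby(values, sort_key)  # Group by idx
--     for key, group in grouper:
--         group = list(group)  # Unpack
--         assert len(set(value[1] for value in group)) == 1, f"Identified new values for {key} inconsistent: {group}"
--         grouped_dims = ' & '.join(value[2] for value in group)
--         grouped_value = (key, group[0][1], grouped_dims)
--         grouped_values.append(grouped_value)
--
--     # Temporary health check
--     grouped_values_old = list(set([value[:2] for value in values]))
--     assert len(grouped_values) == len(grouped_values_old)
--     assert sorted(t[:2] for t in grouped_values) == sorted(t[:2] for t in grouped_values_old)
--
--     return grouped_values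
-- ===== SOURCE B (Python) =====
-- def _group_values(values):
--     # One pass: hash-group full tuples by their first element (input order kept),
--     # then emit groups in sorted key order.
--     groups = {}
--     for value in values:
--         groups.setdefault(value[0], []).append(value)
--     grouped_values = []
--     for key in sorted(groups):
--         group = groups[key]
--         assert len(set(value[1] for value in group)) == 1, f"Identified new values for {key} inconsistent: {group}"
--         grouped_values.append((key, group[0][1], ' & '.join(value[2] for value in group)))
--     return grouped_values
-- ===== Notes on version B (the rewrite author's own statement) =====
-- stated objective: idiomatic
-- what changed: Replaces sort-the-whole-tuple-list + itertools.groupby with a single hash-grouping pass (dict keyed by value[0], appending full tuples in input order) followed by iterating over sorted keys only; the redundant set-based health check disappears.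
import Mathlib
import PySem

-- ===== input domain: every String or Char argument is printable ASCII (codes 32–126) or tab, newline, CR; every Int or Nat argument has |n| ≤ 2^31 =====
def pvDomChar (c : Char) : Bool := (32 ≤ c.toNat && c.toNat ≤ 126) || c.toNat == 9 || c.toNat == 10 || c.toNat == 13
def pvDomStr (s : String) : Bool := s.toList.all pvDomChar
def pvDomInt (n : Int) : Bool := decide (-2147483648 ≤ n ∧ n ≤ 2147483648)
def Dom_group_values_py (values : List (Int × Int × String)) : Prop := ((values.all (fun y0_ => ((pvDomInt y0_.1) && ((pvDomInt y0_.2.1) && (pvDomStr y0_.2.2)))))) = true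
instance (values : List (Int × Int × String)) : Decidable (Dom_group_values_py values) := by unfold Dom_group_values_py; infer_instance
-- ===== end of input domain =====

-- B replaces A's sort-whole-tuples + itertools.groupby with one hash-grouping pass over the
-- input (dict keyed by the first component) followed by a loop over the sorted keys (idiomatic).


-- ===== PORT A =====
-- itertools.groupby over a list: consecutive runs of elements sharing the key (first component)
def gvGroupBy : List (Int × Int × String) → List (Int × List (Int × Int × String))
  | [] => []
  | x :: xs =>
    (x.1, x :: xs.takeWhile (fun y => y.1 == x.1)) ::
      gvGroupBy (xs.dropWhile (fun y => y.1 == x.1))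
  termination_by s => s.length
  decreasing_by
    have := List.length_dropWhile_le (fun y => y.1 == x.1) xs
    simp only [List.length_cons]; omega

-- A's asserts (group consistency and the trailing health checks) hold on every input Pre_ admits
def group_values_py (values : List (Int × Int × String)) : List (Int × Int × String) :=
  let sortedValues := PySem.List.sorted values (fun v => v.1)
  (gvGroupBy sortedValues).foldl
    (fun grouped_values kg =>
      grouped_values ++
        [(kg.1, (PySem.List.pyGetD kg.2 0 (0, 0, "")).2.1,
          PySem.Str.join " & " (kg.2.map (fun value => value.2.2)))]) []

-- ===== PORT B =====
def group_values_py_alt (values : List (Int × Int × String)) : List (Int × Int × String) :=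
  let groups := values.foldl
    (fun groups value => groups.modify value.1 [] (fun g => g ++ [value]))
    (PySem.Dict.empty : PySem.Dict Int (List (Int × Int × String)))
  (PySem.List.sorted groups.keys (fun k => k)).foldl
    (fun grouped_values key =>
      grouped_values ++
        [(key, (PySem.List.pyGetD (groups.getD key []) 0 (0, 0, "")).2.1,
          PySem.Str.join " & " ((groups.getD key []).map (fun value => value.2.2)))]) []

-- ===== PRECONDITION & SPEC =====
-- Pre_ excludes inputs holding two tuples with the same first component but different second
-- components: there both A and B raise AssertionError ("inconsistent") and return no value.
def Pre_group_values_py (values : List (Int × Int × String)) : Prop :=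
  ∀ a ∈ values, ∀ b ∈ values, a.1 = b.1 → a.2.1 = b.2.1
instance (values : List (Int × Int × String)) : Decidable (Pre_group_values_py values) := by
  unfold Pre_group_values_py; infer_instance

def pvWitness_group_values_py : (List (Int × Int × String)) :=
  [(1, 2, "row 3"), (0, 5, "box 1"), (1, 2, "column 7")]

def Spec_group_values_py (values : List (Int × Int × String)) (out : List (Int × Int × String)) : Prop := out = group_values_py_alt values
instance (values : List (Int × Int × String)) (out : List (Int × Int × String)) : Decidable (Spec_group_values_py values out) := by unfold Spec_group_values_py; infer_instance

-- ===== CLAIM (what is proved, stated in full; the proofs are below) =====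
def Claim_equal_group_values_py : Prop := ∀ (values : List (Int × Int × String)), Dom_group_values_py values → Pre_group_values_py values → Spec_group_values_py values (group_values_py values)

-- ===== LEMMAS AND PROOFS =====

-- filtering one key class through an insertion step: elements equal to the key stay in front
theorem gv_filter_insertBy (x : Int × Int × String) (k : Int) (acc : List (Int × Int × String))
    (hacc : acc.Pairwise (fun a b => a.1 ≤ b.1)) :
    (PySem.List.insertBy (fun a b => decide (a.1 < b.1)) x acc).filter (fun v => v.1 == k)
      = acc.filter (fun v => v.1 == k) ++ (if x.1 == k then [x] else []) := by
  induction acc with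
  | nil => simp [PySem.List.insertBy, List.filter_cons]
  | cons y ys ih =>
    rcases List.pairwise_cons.mp hacc with ⟨hy, hys⟩
    rw [PySem.List.insertBy]
    by_cases hb : decide (x.1 < y.1) = true
    · rw [if_pos hb]
      have hxy : x.1 < y.1 := by simpa using hb
      rw [List.filter_cons]
      by_cases hxk : x.1 = k
      · have hnil : (y :: ys).filter (fun v => v.1 == k) = [] := by
          refine List.filter_eq_nil_iff.mpr ?_
          intro z hz
          have hz1 : x.1 < z.1 := by
            rcases List.mem_cons.mp hz with rfl | hz'
            · exact hxy
            · exact lt_of_lt_of_le hxy (hy z hz')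
          simp only [beq_iff_eq]; omega
        simp [hxk, hnil]
      · have hf : (x.1 == k) = false := by simpa using hxk
        simp [hf]
    · rw [if_neg hb, List.filter_cons, List.filter_cons, ih hys]
      by_cases hyk : (y.1 == k) = true <;> simp [hyk]

-- stability of Python's sort: the subsequence of tuples with one given key is unchanged
theorem gv_sorted_filter (values : List (Int × Int × String)) (k : Int) :
    (PySem.List.sorted values (fun v => v.1)).filter (fun v => v.1 == k)
      = values.filter (fun v => v.1 == k) := by
  induction values using List.reverseRecOn with
  | nil => rfl
  | append_singleton xs x ih =>
    have hpair : (PySem.List.sorted xs (fun v : Int × Int × String => v.1)).Pairwise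
        (fun a b => a.1 ≤ b.1) := PySem.List.sorted_pairwise xs _
    rw [PySem.List.sorted_eq_foldl_insertBy, List.foldl_append, List.foldl_cons, List.foldl_nil,
      ← PySem.List.sorted_eq_foldl_insertBy, gv_filter_insertBy x k _ hpair, ih,
      List.filter_append]
    simp [List.filter_cons]

-- after dropping the leading run of key c from a sorted tail, every key is strictly larger
theorem gv_dropWhile_lt (c : Int) (xs : List (Int × Int × String))
    (hp : xs.Pairwise (fun a b => a.1 ≤ b.1)) (hb : ∀ y ∈ xs, c ≤ y.1) :
    ∀ y ∈ xs.dropWhile (fun v => v.1 == c), c < y.1 := by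
  induction xs with
  | nil => simp
  | cons y ys ih =>
    rcases List.pairwise_cons.mp hp with ⟨hy, hys⟩
    rw [List.dropWhile_cons]
    split_ifs with h
    · exact ih hys (fun z hz => hb z (List.mem_cons_of_mem _ hz))
    · have hyc : y.1 ≠ c := by simpa using h
      have hcy : c < y.1 := lt_of_le_of_ne (hb y (List.mem_cons_self)) (Ne.symm hyc)
      intro z hz
      rcases List.mem_cons.mp hz with rfl | hz'
      · exact hcy
      · exact lt_of_lt_of_le hcy (hy z hz')

-- groupby of a key-sorted list: each group is the key's filter class, keys strictly increase
theorem gv_groupBy_spec (s : List (Int × Int × String))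
    (hs : s.Pairwise (fun a b => a.1 ≤ b.1)) :
    (∀ kg ∈ gvGroupBy s, kg.2 = s.filter (fun v => v.1 == kg.1)) ∧
    ((gvGroupBy s).map (fun kg => kg.1)).Pairwise (· < ·) ∧
    (∀ k, k ∈ (gvGroupBy s).map (fun kg => kg.1) ↔ k ∈ s.map (fun v => v.1)) := by
  induction s using gvGroupBy.induct with
  | case1 => simp [gvGroupBy]
  | case2 x xs ih =>
    rcases List.pairwise_cons.mp hs with ⟨hx, hp⟩
    have hrp : (xs.dropWhile (fun y => y.1 == x.1)).Pairwise (fun a b => a.1 ≤ b.1) :=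
      hp.sublist (List.dropWhile_sublist _)
    have hlt : ∀ y ∈ xs.dropWhile (fun y => y.1 == x.1), x.1 < y.1 :=
      gv_dropWhile_lt x.1 xs hp hx
    have ht : ∀ y ∈ xs.takeWhile (fun y => y.1 == x.1), y.1 = x.1 := by
      intro y hy; simpa using List.mem_takeWhile_imp hy
    rcases ih hrp with ⟨ihg, ihp, ihm⟩
    have hsplit : xs = xs.takeWhile (fun y => y.1 == x.1) ++ xs.dropWhile (fun y => y.1 == x.1) :=
      (List.takeWhile_append_dropWhile).symm
    have hkeymem : ∀ k ∈ (gvGroupBy (xs.dropWhile (fun y => y.1 == x.1))).map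
        (fun kg => kg.1), x.1 < k := by
      intro k hk
      rcases List.mem_map.mp ((ihm k).mp hk) with ⟨y, hy, rfl⟩
      exact hlt y hy
    have hfilt_t : ∀ k, x.1 ≠ k →
        (xs.takeWhile (fun y => y.1 == x.1)).filter (fun v => v.1 == k) = [] := by
      intro k hk
      refine List.filter_eq_nil_iff.mpr ?_
      intro z hz; have := ht z hz; simp only [beq_iff_eq]; omega
    have hfilt_r : (xs.dropWhile (fun y => y.1 == x.1)).filter (fun v => v.1 == x.1) = [] := by
      refine List.filter_eq_nil_iff.mpr ?_
      intro z hz; have := hlt z hz; simp only [beq_iff_eq]; omega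
    refine ⟨?_, ?_, ?_⟩
    · intro kg hkg
      rw [gvGroupBy] at hkg
      rcases List.mem_cons.mp hkg with rfl | hkg'
      · -- the leading run
        have htf : (xs.takeWhile (fun y => y.1 == x.1)).filter (fun v => v.1 == x.1)
            = xs.takeWhile (fun y => y.1 == x.1) := by
          refine List.filter_eq_self.mpr ?_
          intro z hz; simpa using ht z hz
        have hxs : List.filter (fun v => v.1 == x.1) xs
            = xs.takeWhile (fun y => y.1 == x.1) := by
          conv_lhs => rw [hsplit]
          rw [List.filter_append, htf, hfilt_r, List.append_nil]
        show x :: xs.takeWhile (fun y => y.1 == x.1)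
            = List.filter (fun v => v.1 == x.1) (x :: xs)
        rw [List.filter_cons, if_pos (by simp), hxs]
      · have hne : x.1 ≠ kg.1 := by
          have : x.1 < kg.1 := hkeymem kg.1 (List.mem_map.mpr ⟨kg, hkg', rfl⟩)
          omega
        rw [ihg kg hkg', List.filter_cons, if_neg (by simpa using hne)]
        conv_rhs => rw [hsplit]
        rw [List.filter_append, hfilt_t kg.1 hne, List.nil_append]
    · rw [gvGroupBy]
      simp only [List.map_cons]
      exact List.pairwise_cons.mpr ⟨hkeymem, ihp⟩
    · intro k
      rw [gvGroupBy]
      simp only [List.map_cons, List.mem_cons, ihm k]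
      conv_rhs => rw [hsplit]
      simp only [List.map_append, List.mem_append]
      constructor
      · rintro (rfl | h)
        · exact Or.inl rfl
        · exact Or.inr (Or.inr h)
      · rintro (rfl | h | h)
        · exact Or.inl rfl
        · rcases List.mem_map.mp h with ⟨y, hy, rfl⟩
          exact Or.inl (ht y hy)
        · exact Or.inr h

-- the grouping dict built by B: lookups are the key's filter class, keys the deduped key list
theorem gv_dict_getD (values : List (Int × Int × String)) (k : Int) :
    (values.foldl (fun d v => d.modify v.1 [] (fun g => g ++ [v]))
        (PySem.Dict.empty : PySem.Dict Int (List (Int × Int × String)))).getD k []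
      = values.filter (fun v => v.1 == k) := by
  have h := PySem.Dict.getD_foldl_modify_append
    (values.map (fun v => (v.1, v))) (PySem.Dict.empty) k
  rw [List.foldl_map] at h
  simpa [List.filter_map, List.map_map, Function.comp_def] using h

theorem gv_dict_keys (values : List (Int × Int × String)) :
    (values.foldl (fun d v => d.modify v.1 [] (fun g => g ++ [v]))
        (PySem.Dict.empty : PySem.Dict Int (List (Int × Int × String)))).keys
      = PySem.Set.ofList (values.map (fun v => v.1)) := by
  rw [PySem.Dict.keys_foldl_modify_key values (fun v => v.1) []
    (fun _ v => fun g => g ++ [v]) PySem.Dict.empty]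
  rfl

-- ===== VERDICT (by name: the statement is the Claim_ definition above) =====
theorem group_values_py_spec : Claim_equal_group_values_py := by
  intro values _ _
  show group_values_py values = group_values_py_alt values
  unfold group_values_py group_values_py_alt
  rw [PySem.List.foldl_append_singleton_eq_map
      (fun kg : Int × List (Int × Int × String) =>
        (kg.1, (PySem.List.pyGetD kg.2 0 (0, 0, "")).2.1,
          PySem.Str.join " & " (kg.2.map (fun value => value.2.2)))),
    PySem.List.foldl_append_singleton_eq_map, List.nil_append, List.nil_append,
    gv_dict_keys]
  simp only [gv_dict_getD]
  set s := PySem.List.sorted values (fun v : Int × Int × String => v.1) with hsdef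
  have hs : s.Pairwise (fun a b => a.1 ≤ b.1) :=
    PySem.List.sorted_pairwise values (fun v : Int × Int × String => v.1)
  rcases gv_groupBy_spec s hs with ⟨hg, hpairs, hmem⟩
  have hnodup : ((gvGroupBy s).map (fun kg => kg.1)).Nodup :=
    hpairs.imp (fun h => ne_of_lt h)
  have hperm : ((gvGroupBy s).map (fun kg => kg.1)).Perm
      (PySem.Set.ofList (values.map (fun v => v.1))) := by
    refine (List.perm_ext_iff_of_nodup hnodup (PySem.Set.nodup_ofList _)).mpr ?_
    intro k
    rw [hmem k, PySem.Set.mem_ofList]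
    exact (((PySem.List.sorted_perm values
      (fun v : Int × Int × String => v.1) false)).map (fun v => v.1)).mem_iff
  rw [PySem.List.sorted_eq_of_perm_of_pairwise_lt _ _ (fun k => k) hperm hpairs,
    List.map_map]
  refine List.map_congr_left ?_
  intro kg hkg
  rw [Function.comp_apply, hg kg hkg, gv_sorted_filter]
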